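-- pv_equiv track=rewrite | github.com/Indivicivet/toki_pona | transliterate_app/transliterate_app.py | space_free_columns
-- ===== SOURCE A (Python) =====
-- def space_free_columns(header, rows):
--     sf = set()
--     for j, name in enumerate(header):
--         all_single = True
--         for r in rows:
--             cell = r[j]
--             if cell and len(cell) != 1:
--                 all_single = False
--                 break
--         if all_single:
--             sf.add(name)
--     return sf
-- ===== SOURCE B (Python) =====
-- def space_free_columns(header, rows):
--     disq = set()
--     for r in rows:
--         for j in range(len(header)):
--             if j in disq:
--                 continue
--             cell = r[j]
--             if cell and len(cell) != 1:
--                 disq.add(j)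
--     return {header[j] for j in range(len(header)) if j not in disq}
-- ===== Notes on version B (the rewrite author's own statement) =====
-- stated objective: alternative
-- what changed: Inverted the loop nesting: one row-major pass maintains a set of disqualified column indices (skipping already-disqualified columns, preserving the original cell-access pattern), then the surviving indices' header names are collected, instead of a per-column scan with a boolean flag and early break.
import Mathlib
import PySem

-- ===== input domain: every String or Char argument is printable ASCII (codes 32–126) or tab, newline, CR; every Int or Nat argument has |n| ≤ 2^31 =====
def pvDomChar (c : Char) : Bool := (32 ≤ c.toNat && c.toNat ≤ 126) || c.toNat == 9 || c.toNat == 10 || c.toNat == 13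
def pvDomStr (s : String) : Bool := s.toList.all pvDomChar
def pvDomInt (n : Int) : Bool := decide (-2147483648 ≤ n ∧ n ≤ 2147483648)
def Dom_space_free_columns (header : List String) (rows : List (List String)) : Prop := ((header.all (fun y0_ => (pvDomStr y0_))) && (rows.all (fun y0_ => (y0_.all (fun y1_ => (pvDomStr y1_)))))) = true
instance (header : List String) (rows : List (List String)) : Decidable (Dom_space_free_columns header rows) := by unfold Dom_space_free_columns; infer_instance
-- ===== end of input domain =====

-- B inverts A's loop nesting: one row-major pass maintaining a set of disqualified
-- column indices (same cell-access pattern), then names of surviving indices; same cost.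


-- ===== PORT A =====
-- 'cell and len(cell) != 1' on the cell read at index j (missing cell excluded by Pre_)
def pvBadCell (r : List String) (j : Int) : Bool :=
  let cell := PySem.List.pyGetD r j ""
  decide (cell.toList ≠ []) && decide (PySem.Str.len cell ≠ 1)

-- A's inner 'for r in rows: … break' loop computing all_single for column j
def pvAllSingle (rows : List (List String)) (j : Int) : Bool :=
  match rows with
  | [] => true
  | r :: rs => if pvBadCell r j then false else pvAllSingle rs j

def space_free_columns (header : List String) (rows : List (List String)) : List String :=
  (PySem.List.enumerate header).foldl
    (fun sf p => if pvAllSingle rows p.1 then PySem.Set.add sf p.2 else sf)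
    PySem.Set.empty

-- ===== PORT B =====
def space_free_columns_alt (header : List String) (rows : List (List String)) : List String :=
  let idxs := PySem.List.pyRange 0 (PySem.List.len header)
  let disq : PySem.Set Int :=
    rows.foldl
      (fun d r =>
        idxs.foldl
          (fun d j =>
            if PySem.Set.contains d j then d
            else if pvBadCell r j then PySem.Set.add d j else d)
          d)
      PySem.Set.empty
  idxs.foldl
    (fun s j =>
      if PySem.Set.contains disq j then s
      else PySem.Set.add s (PySem.List.pyGetD header j ""))
    PySem.Set.empty

-- ===== PRECONDITION & SPEC =====
-- Pre_ excludes exactly the inputs where Python A raises IndexError: a cell r[j] that the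
-- column-j scan actually reaches (no earlier row disqualified column j) is missing.
def Pre_space_free_columns (header : List String) (rows : List (List String)) : Prop :=
  ∀ j < header.length, ∀ i < rows.length,
    (∀ k < i, ¬ (j < (rows.getD k []).length ∧ 2 ≤ ((rows.getD k []).getD j "").toList.length))
    → j < (rows.getD i []).length
instance (header : List String) (rows : List (List String)) : Decidable (Pre_space_free_columns header rows) := by unfold Pre_space_free_columns; infer_instance
def pvWitness_space_free_columns : List String × List (List String) :=
  (["a", "bc"], [["x", "yy"], ["", "z"]])
def Spec_space_free_columns (header : List String) (rows : List (List String)) (out : List String) : Prop := out = space_free_columns_alt header rows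
instance (header : List String) (rows : List (List String)) (out : List String) : Decidable (Spec_space_free_columns header rows out) := by unfold Spec_space_free_columns; infer_instance

-- ===== CLAIM (what is proved, stated in full; the proofs are below) =====
def Claim_equal_space_free_columns : Prop := ∀ (header : List String) (rows : List (List String)), Dom_space_free_columns header rows → Pre_space_free_columns header rows → Spec_space_free_columns header rows (space_free_columns header rows)

-- ===== LEMMAS AND PROOFS =====

-- A's inner loop is the negated 'any bad cell' over rows
theorem pvAllSingle_eq_not_any (rows : List (List String)) (j : Int) :
    pvAllSingle rows j = !rows.any (fun r => pvBadCell r j) := by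
  induction rows with
  | nil => rfl
  | cons r rs ih =>
      simp only [pvAllSingle, List.any_cons]
      by_cases h : pvBadCell r j = true <;> simp [h, ih]

-- one step of B's inner loop, seen through membership
theorem pvStep_contains (row : List String) (d : PySem.Set Int) (j0 j : Int) :
    PySem.Set.contains (if PySem.Set.contains d j0 then d
      else if pvBadCell row j0 then PySem.Set.add d j0 else d) j
    = (PySem.Set.contains d j || (decide (j = j0) && pvBadCell row j0)) := by
  split_ifs with h1 h2
  · simp only [PySem.Set.contains] at h1
    by_cases hj : j = j0 <;> simp_all [PySem.Set.contains]
  · simp only [PySem.Set.contains, List.contains_eq_mem, PySem.Set.mem_add]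
    by_cases hj : j = j0 <;> simp_all
  · simp [h2]

-- one row of B's pass: membership after the inner fold
theorem pvInner_contains (js : List Int) (d : PySem.Set Int) (row : List String) (j : Int) :
    PySem.Set.contains
      (js.foldl (fun d j =>
          if PySem.Set.contains d j then d
          else if pvBadCell row j then PySem.Set.add d j else d) d) j
    = (PySem.Set.contains d j || (decide (j ∈ js) && pvBadCell row j)) := by
  induction js generalizing d with
  | nil => simp
  | cons j0 js ih =>
      simp only [List.foldl_cons, ih, pvStep_contains]
      by_cases hj : j = j0
      · subst hj; cases h : pvBadCell row j <;> simp [h]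
      · simp [hj, Bool.or_assoc]

-- B's whole pass: j is disqualified iff some row has a bad cell at j (for j in range)
theorem pvDisq_contains (rows : List (List String)) (js : List Int)
    (d : PySem.Set Int) (j : Int) (hj : j ∈ js) :
    PySem.Set.contains
      (rows.foldl (fun d r =>
          js.foldl (fun d j =>
              if PySem.Set.contains d j then d
              else if pvBadCell r j then PySem.Set.add d j else d) d) d) j
    = (PySem.Set.contains d j || rows.any (fun r => pvBadCell r j)) := by
  induction rows generalizing d with
  | nil => simp
  | cons r rs ih =>
      simp only [List.foldl_cons, List.any_cons, ih, pvInner_contains]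
      simp [hj, Bool.or_assoc]

theorem space_free_columns_eq (header : List String) (rows : List (List String)) :
    space_free_columns header rows = space_free_columns_alt header rows := by
  unfold space_free_columns space_free_columns_alt
  rw [PySem.List.enumerate_eq_map_pyRange header ""]
  rw [List.foldl_map]
  apply PySem.List.foldl_congr_mem'
  intro j hj s
  rw [pvDisq_contains rows _ PySem.Set.empty j hj]
  simp only [PySem.Set.contains, PySem.Set.empty, List.contains_nil, Bool.false_or]
  rw [pvAllSingle_eq_not_any]
  cases h : rows.any (fun r => pvBadCell r j) <;> simp [h]

-- ===== VERDICT (by name: the statement is the Claim_ definition above) =====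
theorem space_free_columns_spec : Claim_equal_space_free_columns := by
  intro header rows _ _
  unfold Spec_space_free_columns
  exact space_free_columns_eq header rows
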